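-- pv_equiv track=rewrite | github.com/realakshayk/healthy-meal-finder | healthy-meal-finder/meal_utils.py | get_scored_meals
-- ===== SOURCE A (Python) =====
-- def score_meal(meal, rules):
--     """
--     Assigns a score based on how well the meal fits the nutrition rules.
--     """
--     score = 0
--
--     if "max_calories" in rules and meal["calories"] <= rules["max_calories"]:
--         score += 1
--     if "min_protein" in rules and meal["protein"] >= rules["min_protein"]:
--         score += 1
--     if "max_carbs" in rules and meal["carbs"] <= rules["max_carbs"]:
--         score += 1
--     if "min_fat" in rules and meal["fat"] >= rules["min_fat"]:
--         score += 1
--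
--     return score
--
-- def get_scored_meals(meals, rules):
--     """
--     Scores each meal and returns sorted list from best to worst match.
--     """
--     scored = []
--
--     for meal in meals:
--         score = score_meal(meal, rules)
--         if score > 0:
--             meal_copy = meal.copy()
--             meal_copy["score"] = score
--             scored.append(meal_copy)
--
--     # Sort descending by score
--     scored.sort(key=lambda m: m["score"], reverse=True)
--     return scored
-- ===== SOURCE B (Python) =====
-- # B: single pass distributing scored meal copies into four score buckets concatenated high-to-low, instead of A's stable reverse sort.
-- def get_scored_meals(meals, rules):
--     checks = (("max_calories", "calories", True), ("min_protein", "protein", False),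
--               ("max_carbs", "carbs", True), ("min_fat", "fat", False))
--     b4, b3, b2, b1 = [], [], [], []
--     for meal in meals:
--         score = sum(1 for rk, mk, is_max in checks
--                     if rk in rules and (meal[mk] <= rules[rk] if is_max else meal[mk] >= rules[rk]))
--         if score > 0:
--             meal_copy = meal.copy()
--             meal_copy["score"] = score
--             if score == 4:
--                 b4.append(meal_copy)
--             elif score == 3:
--                 b3.append(meal_copy)
--             elif score == 2:
--                 b2.append(meal_copy)
--             else:
--                 b1.append(meal_copy)
--     return b4 + b3 + b2 + b1
-- ===== Notes on version B (the rewrite author's own statement) =====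
-- stated objective: alternative
-- what changed: Replaces the comparison sort over scored meals by a single pass that distributes each scored meal copy into one of four score buckets (scores are always 1..4) and concatenates the buckets from 4 down to 1, preserving input order within equal scores exactly as Python's stable reverse sort does.
import Mathlib
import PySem

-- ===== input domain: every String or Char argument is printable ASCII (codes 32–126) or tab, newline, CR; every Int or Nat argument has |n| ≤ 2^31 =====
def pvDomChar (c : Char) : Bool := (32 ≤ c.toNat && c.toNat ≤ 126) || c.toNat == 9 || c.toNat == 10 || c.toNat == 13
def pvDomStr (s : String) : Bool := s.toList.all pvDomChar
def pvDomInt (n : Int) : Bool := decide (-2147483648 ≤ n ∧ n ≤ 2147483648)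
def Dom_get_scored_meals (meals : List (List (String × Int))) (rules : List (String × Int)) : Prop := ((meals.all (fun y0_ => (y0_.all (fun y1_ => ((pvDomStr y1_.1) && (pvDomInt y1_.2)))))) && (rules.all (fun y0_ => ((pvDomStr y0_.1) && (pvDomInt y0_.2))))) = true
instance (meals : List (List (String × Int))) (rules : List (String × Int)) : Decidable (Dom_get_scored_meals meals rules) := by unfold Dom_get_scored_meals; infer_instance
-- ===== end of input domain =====

-- B replaces A's stable reverse sort of scored meals by a single-pass bucket distribution over the four possible scores (an alternative algorithm; the claim is about the return value only).


-- ===== PORT A =====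
def score_meal (meal : PySem.Dict String Int) (rules : PySem.Dict String Int) : Int :=
  let score : Int := 0
  let score := if rules.contains "max_calories" && decide (meal.getD "calories" 0 ≤ rules.getD "max_calories" 0) then score + 1 else score
  let score := if rules.contains "min_protein" && decide (meal.getD "protein" 0 ≥ rules.getD "min_protein" 0) then score + 1 else score
  let score := if rules.contains "max_carbs" && decide (meal.getD "carbs" 0 ≤ rules.getD "max_carbs" 0) then score + 1 else score
  let score := if rules.contains "min_fat" && decide (meal.getD "fat" 0 ≥ rules.getD "min_fat" 0) then score + 1 else score
  score

def get_scored_meals (meals : List (List (String × Int))) (rules : List (String × Int)) : List (List (String × Int)) :=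
  let rulesD := PySem.Dict.ofList rules
  let scored := meals.foldl (fun scored meal =>
      let mealD := PySem.Dict.ofList meal
      let score := score_meal mealD rulesD
      if score > 0 then scored ++ [(mealD.insert "score" score).items] else scored) []
  PySem.List.sorted scored (fun m => (PySem.Dict.mk m).getD "score" 0) true

-- ===== PORT B =====
def pvChecks : List (String × String × Bool) :=
  [("max_calories", "calories", true), ("min_protein", "protein", false),
   ("max_carbs", "carbs", true), ("min_fat", "fat", false)]

def pvScoreB (meal : PySem.Dict String Int) (rules : PySem.Dict String Int) : Int :=
  ((pvChecks.countP (fun c => rules.contains c.1 &&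
      (if c.2.2 then decide (meal.getD c.2.1 0 ≤ rules.getD c.1 0)
       else decide (meal.getD c.2.1 0 ≥ rules.getD c.1 0))) : Nat) : Int)

def get_scored_meals_alt (meals : List (List (String × Int))) (rules : List (String × Int)) : List (List (String × Int)) :=
  let rulesD := PySem.Dict.ofList rules
  let b := meals.foldl (fun (b : List (List (String × Int)) × List (List (String × Int)) × List (List (String × Int)) × List (List (String × Int))) meal =>
      let mealD := PySem.Dict.ofList meal
      let score := pvScoreB mealD rulesD
      if score > 0 then
        let mc := (mealD.insert "score" score).items
        if score = 4 then (b.1 ++ [mc], b.2.1, b.2.2.1, b.2.2.2)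
        else if score = 3 then (b.1, b.2.1 ++ [mc], b.2.2.1, b.2.2.2)
        else if score = 2 then (b.1, b.2.1, b.2.2.1 ++ [mc], b.2.2.2)
        else (b.1, b.2.1, b.2.2.1, b.2.2.2 ++ [mc])
      else b) ([], [], [], [])
  b.1 ++ b.2.1 ++ b.2.2.1 ++ b.2.2.2

-- ===== PRECONDITION & SPEC =====
-- Pre_ excludes exactly the inputs where Python A raises KeyError: a rule key is present but some meal lacks the corresponding nutrient field.
def Pre_get_scored_meals (meals : List (List (String × Int))) (rules : List (String × Int)) : Prop :=
  ("max_calories" ∈ rules.map Prod.fst → ∀ m ∈ meals, "calories" ∈ m.map Prod.fst) ∧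
  ("min_protein" ∈ rules.map Prod.fst → ∀ m ∈ meals, "protein" ∈ m.map Prod.fst) ∧
  ("max_carbs" ∈ rules.map Prod.fst → ∀ m ∈ meals, "carbs" ∈ m.map Prod.fst) ∧
  ("min_fat" ∈ rules.map Prod.fst → ∀ m ∈ meals, "fat" ∈ m.map Prod.fst)
-- (a meal may freely carry a "score" key already: both programs overwrite it in the copy, so Pre_ does not restrict it)
instance (meals : List (List (String × Int))) (rules : List (String × Int)) : Decidable (Pre_get_scored_meals meals rules) := by unfold Pre_get_scored_meals; infer_instance

def pvWitness_get_scored_meals : (List (List (String × Int))) × (List (String × Int)) :=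
  ([[("calories", 100), ("protein", 20), ("carbs", 30), ("fat", 10)]], [("max_calories", 500), ("min_protein", 15)])

def Spec_get_scored_meals (meals : List (List (String × Int))) (rules : List (String × Int)) (out : List (List (String × Int))) : Prop := out = get_scored_meals_alt meals rules
instance (meals : List (List (String × Int))) (rules : List (String × Int)) (out : List (List (String × Int))) : Decidable (Spec_get_scored_meals meals rules out) := by unfold Spec_get_scored_meals; infer_instance

-- ===== CLAIM (what is proved, stated in full; the proofs are below) =====
def Claim_equal_get_scored_meals : Prop := ∀ (meals : List (List (String × Int))) (rules : List (String × Int)), Dom_get_scored_meals meals rules → Pre_get_scored_meals meals rules → Spec_get_scored_meals meals rules (get_scored_meals meals rules)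

-- ===== LEMMAS AND PROOFS =====

-- the scored copy A/B append for a meal (proof-side abbreviation)
def pvItem (rd : PySem.Dict String Int) (meal : List (String × Int)) : List (String × Int) :=
  ((PySem.Dict.ofList meal).insert "score" (score_meal (PySem.Dict.ofList meal) rd)).items

-- the meals that land in bucket v, in input order, as scored copies
def pvBucket (rd : PySem.Dict String Int) (v : Int) (meals : List (List (String × Int))) : List (List (String × Int)) :=
  (meals.filter (fun m => score_meal (PySem.Dict.ofList m) rd == v)).map (pvItem rd)

-- A's loop body and B's loop body, named so the induction hypotheses match syntactically
def pvStepA (rd : PySem.Dict String Int) (scored : List (List (String × Int))) (meal : List (String × Int)) : List (List (String × Int)) :=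
  let mealD := PySem.Dict.ofList meal
  let score := score_meal mealD rd
  if score > 0 then scored ++ [(mealD.insert "score" score).items] else scored

def pvStepB (rd : PySem.Dict String Int)
    (b : List (List (String × Int)) × List (List (String × Int)) × List (List (String × Int)) × List (List (String × Int)))
    (meal : List (String × Int)) :
    List (List (String × Int)) × List (List (String × Int)) × List (List (String × Int)) × List (List (String × Int)) :=
  let mealD := PySem.Dict.ofList meal
  let score := pvScoreB mealD rd
  if score > 0 then
    let mc := (mealD.insert "score" score).items
    if score = 4 then (b.1 ++ [mc], b.2.1, b.2.2.1, b.2.2.2)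
    else if score = 3 then (b.1, b.2.1 ++ [mc], b.2.2.1, b.2.2.2)
    else if score = 2 then (b.1, b.2.1, b.2.2.1 ++ [mc], b.2.2.2)
    else (b.1, b.2.1, b.2.2.1, b.2.2.2 ++ [mc])
  else b

theorem a_unfold (meals : List (List (String × Int))) (rules : List (String × Int)) :
    get_scored_meals meals rules =
      PySem.List.sorted (meals.foldl (pvStepA (PySem.Dict.ofList rules)) [])
        (fun m => (PySem.Dict.mk m).getD "score" 0) true := rfl

theorem b_unfold (meals : List (List (String × Int))) (rules : List (String × Int)) :
    get_scored_meals_alt meals rules =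
      (meals.foldl (pvStepB (PySem.Dict.ofList rules)) ([], [], [], [])).1 ++
      (meals.foldl (pvStepB (PySem.Dict.ofList rules)) ([], [], [], [])).2.1 ++
      (meals.foldl (pvStepB (PySem.Dict.ofList rules)) ([], [], [], [])).2.2.1 ++
      (meals.foldl (pvStepB (PySem.Dict.ofList rules)) ([], [], [], [])).2.2.2 := rfl

theorem pvScoreB_eq (md rd : PySem.Dict String Int) : pvScoreB md rd = score_meal md rd := by
  simp only [pvScoreB, pvChecks, score_meal, List.countP_cons, List.countP_nil]
  split_ifs <;> simp_all

theorem score_bounds (md rd : PySem.Dict String Int) :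
    0 ≤ score_meal md rd ∧ score_meal md rd ≤ 4 := by
  simp only [score_meal]; split_ifs <;> omega

theorem key_pvItem (rd : PySem.Dict String Int) (meal : List (String × Int)) :
    (PySem.Dict.mk (pvItem rd meal)).getD "score" 0 = score_meal (PySem.Dict.ofList meal) rd := by
  simp only [pvItem]
  exact PySem.Dict.getD_insert_self _ _ _ _

theorem A_loop (rd : PySem.Dict String Int) (meals : List (List (String × Int)))
    (acc : List (List (String × Int))) :
    meals.foldl (pvStepA rd) acc
      = acc ++ (meals.filter (fun m => decide (score_meal (PySem.Dict.ofList m) rd > 0))).map (pvItem rd) := by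
  induction meals generalizing acc with
  | nil => simp
  | cons m t ih =>
    rw [List.foldl_cons, ih]
    by_cases h : score_meal (PySem.Dict.ofList m) rd > 0 <;>
      simp [pvStepA, h, pvItem]

theorem B_loop (rd : PySem.Dict String Int) (meals : List (List (String × Int)))
    (b4 b3 b2 b1 : List (List (String × Int))) :
    meals.foldl (pvStepB rd) (b4, b3, b2, b1)
      = (b4 ++ pvBucket rd 4 meals, b3 ++ pvBucket rd 3 meals,
         b2 ++ pvBucket rd 2 meals, b1 ++ pvBucket rd 1 meals) := by
  induction meals generalizing b4 b3 b2 b1 with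
  | nil => simp [pvBucket]
  | cons m t ih =>
    have hb := score_bounds (PySem.Dict.ofList m) rd
    rw [List.foldl_cons]
    have hstep : ∀ b : List (List (String × Int)) × List (List (String × Int)) × List (List (String × Int)) × List (List (String × Int)),
        pvStepB rd b m =
          (if 0 < score_meal (PySem.Dict.ofList m) rd then
            if score_meal (PySem.Dict.ofList m) rd = 4 then (b.1 ++ [pvItem rd m], b.2.1, b.2.2.1, b.2.2.2)
            else if score_meal (PySem.Dict.ofList m) rd = 3 then (b.1, b.2.1 ++ [pvItem rd m], b.2.2.1, b.2.2.2)
            else if score_meal (PySem.Dict.ofList m) rd = 2 then (b.1, b.2.1, b.2.2.1 ++ [pvItem rd m], b.2.2.2)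
            else (b.1, b.2.1, b.2.2.1, b.2.2.2 ++ [pvItem rd m])
          else b) := by
      intro b; simp only [pvStepB, pvScoreB_eq, pvItem, gt_iff_lt]
    rw [hstep]
    set s := score_meal (PySem.Dict.ofList m) rd with hs
    by_cases h0 : 0 < s
    · by_cases h4 : s = 4
      · rw [if_pos h0, if_pos h4]; rw [ih]
        simp [pvBucket, List.filter_cons, ← hs, h4, (by omega : ¬ s = 3), (by omega : ¬ s = 2), (by omega : ¬ s = 1)]
      · by_cases h3 : s = 3
        · rw [if_pos h0, if_neg h4, if_pos h3]; rw [ih]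
          simp [pvBucket, List.filter_cons, ← hs, h3, h4, (by omega : ¬ s = 2), (by omega : ¬ s = 1)]
        · by_cases h2 : s = 2
          · rw [if_pos h0, if_neg h4, if_neg h3, if_pos h2]; rw [ih]
            simp [pvBucket, List.filter_cons, ← hs, h2, h4, h3, (by omega : ¬ s = 1)]
          · have h1 : s = 1 := by omega
            rw [if_pos h0, if_neg h4, if_neg h3, if_neg h2]; rw [ih]
            simp [pvBucket, List.filter_cons, ← hs, h1, h4, h3, h2]
    · rw [if_neg h0]; rw [ih]
      simp only [pvBucket, List.filter_cons, ← hs]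
      simp only [Prod.mk.injEq]
      refine ⟨?_, ?_, ?_, ?_⟩ <;> rw [if_neg (by simp only [beq_iff_eq, ← hs]; omega)]

theorem insertBy_skip {α : Type} (before : α → α → Bool) (x : α) (l1 l2 : List α)
    (h : ∀ y ∈ l1, before x y = false) :
    PySem.List.insertBy before x (l1 ++ l2) = l1 ++ PySem.List.insertBy before x l2 := by
  induction l1 with
  | nil => simp
  | cons y t ih =>
    simp only [List.cons_append, PySem.List.insertBy, h y (by simp)]
    simp only [Bool.false_eq_true, if_false]
    rw [ih (fun z hz => h z (by simp [hz]))]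

theorem insertBy_front {α : Type} (before : α → α → Bool) (x : α) (l : List α)
    (h : ∀ y ∈ l, before x y = true) :
    PySem.List.insertBy before x l = x :: l := by
  cases l with
  | nil => rfl
  | cons y t => simp [PySem.List.insertBy, h y (by simp)]

theorem sorted_grouped {α : Type} (key : α → Int) (L : List α)
    (h : ∀ x ∈ L, 1 ≤ key x ∧ key x ≤ 4) :
    PySem.List.sorted L key true =
      L.filter (fun x => key x == 4) ++ L.filter (fun x => key x == 3) ++
      L.filter (fun x => key x == 2) ++ L.filter (fun x => key x == 1) := by
  rw [PySem.List.sorted_rev_eq_foldl_insertBy]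
  induction L using List.reverseRecOn with
  | nil => simp
  | append_singleton t x ih =>
    have ht : ∀ y ∈ t, 1 ≤ key y ∧ key y ≤ 4 := fun y hy => h y (by simp [hy])
    have hx : 1 ≤ key x ∧ key x ≤ 4 := h x (by simp)
    rw [List.foldl_append, List.foldl_cons, List.foldl_nil, ih ht]
    have memk : ∀ (v : Int) (y : α), y ∈ t.filter (fun z => key z == v) → key y = v := by
      intro v y hy
      have := List.of_mem_filter hy
      simpa using this
    have hfx : ∀ v : Int, (List.filter (fun z => key z == v) [x]) = if key x = v then [x] else [] := by
      intro v; by_cases hv : key x = v <;> simp [hv]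
    simp only [List.append_assoc, List.filter_append, hfx]
    by_cases h4 : key x = 4
    · rw [insertBy_skip _ _ (t.filter (fun z => key z == 4)) _ (by
        intro y hy; simp [memk _ _ hy, h4])]
      rw [insertBy_front _ _ _ (by
        intro y hy
        simp only [List.mem_append] at hy
        rcases hy with hy | hy | hy <;> simp [memk _ _ hy, h4])]
      simp [h4, (by omega : ¬ key x = 3), (by omega : ¬ key x = 2), (by omega : ¬ key x = 1)]
    · by_cases h3 : key x = 3
      · rw [insertBy_skip _ _ (t.filter (fun z => key z == 4)) _ (by
          intro y hy; simp [memk _ _ hy]; omega)]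
        rw [insertBy_skip _ _ (t.filter (fun z => key z == 3)) _ (by
          intro y hy; simp [memk _ _ hy, h3])]
        rw [insertBy_front _ _ _ (by
          intro y hy
          simp only [List.mem_append] at hy
          rcases hy with hy | hy <;> simp [memk _ _ hy, h3])]
        simp [h3, h4, (by omega : ¬ key x = 2), (by omega : ¬ key x = 1)]
      · by_cases h2 : key x = 2
        · rw [insertBy_skip _ _ (t.filter (fun z => key z == 4)) _ (by
            intro y hy; simp [memk _ _ hy]; omega)]
          rw [insertBy_skip _ _ (t.filter (fun z => key z == 3)) _ (by
            intro y hy; simp [memk _ _ hy]; omega)]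
          rw [insertBy_skip _ _ (t.filter (fun z => key z == 2)) _ (by
            intro y hy; simp [memk _ _ hy, h2])]
          rw [insertBy_front _ _ _ (by
            intro y hy; simp [memk _ _ hy, h2])]
          simp [h2, h3, h4, (by omega : ¬ key x = 1)]
        · have h1 : key x = 1 := by omega
          rw [insertBy_skip _ _ (t.filter (fun z => key z == 4)) _ (by
            intro y hy; simp [memk _ _ hy]; omega)]
          rw [insertBy_skip _ _ (t.filter (fun z => key z == 3)) _ (by
            intro y hy; simp [memk _ _ hy]; omega)]
          rw [insertBy_skip _ _ (t.filter (fun z => key z == 2)) _ (by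
            intro y hy; simp [memk _ _ hy]; omega)]
          rw [PySem.List.insertBy_of_forall_not_before _ _ _ (by
            intro y hy; simp [memk _ _ hy, h1])]
          simp [h1, h2, h3, h4]

theorem filter_pos_filter_eq (rd : PySem.Dict String Int) (meals : List (List (String × Int))) (v : Int) (hv : 1 ≤ v) :
    ((meals.filter (fun m => decide (score_meal (PySem.Dict.ofList m) rd > 0))).map (pvItem rd)).filter
        (fun x => (PySem.Dict.mk x).getD "score" 0 == v)
      = pvBucket rd v meals := by
  rw [List.filter_map]
  simp only [pvBucket, Function.comp_def, key_pvItem, List.filter_filter]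
  congr 1
  apply List.filter_congr
  intro m _
  by_cases h : score_meal (PySem.Dict.ofList m) rd = v
  · simp [h]; omega
  · simp [h]

-- ===== VERDICT (by name: the statement is the Claim_ definition above) =====
theorem get_scored_meals_spec : Claim_equal_get_scored_meals := by
  intro meals rules _dom _pre
  unfold Spec_get_scored_meals
  rw [a_unfold, b_unfold, A_loop, B_loop]
  rw [sorted_grouped _ _ (by
    intro x hx
    simp only [List.nil_append, List.mem_map, List.mem_filter] at hx
    obtain ⟨m, ⟨_, hp⟩, rfl⟩ := hx
    rw [key_pvItem]
    have := score_bounds (PySem.Dict.ofList m) (PySem.Dict.ofList rules)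
    simp at hp
    omega)]
  simp only [List.nil_append]
  rw [filter_pos_filter_eq _ _ 4 (by omega), filter_pos_filter_eq _ _ 3 (by omega),
      filter_pos_filter_eq _ _ 2 (by omega), filter_pos_filter_eq _ _ 1 (by omega)]
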